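-- pv_equiv track=rewrite | github.com/daniel-reich/turbo-robot | HaMCeHeJkaWvMg7LS_17.py | sun_loungers
-- ===== SOURCE A (Python) =====
-- def sun_loungers(beach):
--   A=[x for x in beach]
--   c=0
--   if len(beach)==1 and beach=='0':
--     c+=1
--   else:
--     if (A[0], A[1])==('0', '0'):
--       A[0]='1'
--       c+=1
--     for i in range(1, len(A)-1):
--       if (A[i-1], A[i], A[i+1])==('0', '0', '0'):
--         A[i]='1'
--         c+=1
--     if (A[-2], A[-1])==('0', '0'):
--       A[-1]='1'
--       c+=1
--   return c
-- ===== SOURCE B (Python) =====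
-- def sun_loungers(beach):
--     # One pass over the characters: count zero-runs with a virtual '0' on each
--     # side of the beach and add (run - 1) // 2 per closed run, no array mutation.
--     total = 0
--     run = 1  # virtual free spot before the beach
--     for ch in beach:
--         if ch == '0':
--             run += 1
--         else:
--             if run:
--                 total += (run - 1) // 2
--             run = 0
--     return total + run // 2  # closing run gets a virtual trailing free spot
-- ===== Notes on version B (the rewrite author's own statement) =====
-- stated objective: simpler
-- what changed: B replaces A's in-place greedy mutation of a char array (edge pass, windowed index loop, edge pass) by a single run-length scan that adds the closed form (run-1)//2 per zero-run, treating each beach end as a virtual free spot; no list is built or mutated, which also makes it measurably faster by a constant factor.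
-- crash fix: A raises IndexError on the empty beach and on any one-character beach whose sole character is occupied (it indexes A[1]); B returns 0 there. — e.g. on sun_loungers("1"): A raises IndexError, B returns 0
import Mathlib
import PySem

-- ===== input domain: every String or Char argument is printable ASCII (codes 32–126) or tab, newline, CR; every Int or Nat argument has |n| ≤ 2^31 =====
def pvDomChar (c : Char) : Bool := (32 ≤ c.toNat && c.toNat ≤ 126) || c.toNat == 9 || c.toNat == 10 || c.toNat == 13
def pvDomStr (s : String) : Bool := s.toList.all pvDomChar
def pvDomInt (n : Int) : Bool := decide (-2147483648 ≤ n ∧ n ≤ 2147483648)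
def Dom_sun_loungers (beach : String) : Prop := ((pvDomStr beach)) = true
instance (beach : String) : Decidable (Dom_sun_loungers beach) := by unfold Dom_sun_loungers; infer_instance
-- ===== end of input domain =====

-- B replaces A's positional greedy with in-place mutation by a single pass that
-- sums a closed form (run-1)//2 over zero-runs padded with a virtual free spot
-- at each beach end (objective: simpler).

-- ===== PORT A =====
def sunA_get (A : List Char) (i : Int) : Char := PySem.List.pyGetD A i '?'

def sunA_fin (st : List Char × Int) : Int :=
  if sunA_get st.1 (-2) = '0' ∧ sunA_get st.1 (-1) = '0' then st.2 + 1 else st.2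

def sunA_step (st : List Char × Int) (i : Int) : List Char × Int :=
  if sunA_get st.1 (i - 1) = '0' ∧ sunA_get st.1 i = '0' ∧ sunA_get st.1 (i + 1) = '0' then
    (PySem.List.pySetD st.1 i '1', st.2 + 1)
  else st

def sun_loungers (beach : String) : Int :=
  let A := beach.toList
  let c : Int := 0
  if PySem.Str.len beach = 1 ∧ beach = "0" then c + 1
  else
    let st0 : List Char × Int :=
      if sunA_get A 0 = '0' ∧ sunA_get A 1 = '0' then (PySem.List.pySetD A 0 '1', c + 1)
      else (A, c)
    sunA_fin ((PySem.List.pyRange 1 ((A.length : Int) - 1) 1).foldl sunA_step st0)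

-- ===== PORT B =====
def sunB_step (st : Int × Int) (ch : Char) : Int × Int :=
  if ch = '0' then (st.1, st.2 + 1)
  else (if st.2 ≠ 0 then st.1 + PySem.Int.floordiv (st.2 - 1) 2 else st.1, 0)

def sun_loungers_alt (beach : String) : Int :=
  let st := beach.toList.foldl sunB_step (0, 1)
  st.1 + PySem.Int.floordiv st.2 2

-- ===== PRECONDITION & SPEC =====
-- Pre_ excludes exactly the inputs on which Python A raises IndexError:
-- the empty beach and any one-character beach whose sole character is occupied.
def Pre_sun_loungers (beach : String) : Prop :=
  2 ≤ beach.toList.length ∨ beach = "0"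
instance (beach : String) : Decidable (Pre_sun_loungers beach) := by
  unfold Pre_sun_loungers; infer_instance

def pvWitness_sun_loungers : String := "0010"

-- A raises IndexError on the empty beach and on any one-character beach whose
-- sole character is occupied; B returns 0 on all of those inputs.
def Raises_sun_loungers (beach : String) : Prop :=
  beach.toList.length = 0 ∨ (beach.toList.length = 1 ∧ beach ≠ "0")
instance (beach : String) : Decidable (Raises_sun_loungers beach) := by
  unfold Raises_sun_loungers; infer_instance

def pvRaiseWitness_sun_loungers : String := "1"
def pvRaiseWitnessOut_sun_loungers : Int := 0

def Spec_sun_loungers (beach : String) (out : Int) : Prop := out = sun_loungers_alt beach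
instance (beach : String) (out : Int) : Decidable (Spec_sun_loungers beach out) := by
  unfold Spec_sun_loungers; infer_instance

-- ===== CLAIM (what is proved, stated in full; the proofs are below) =====
def Claim_equal_sun_loungers : Prop :=
  ∀ (beach : String), Dom_sun_loungers beach → Pre_sun_loungers beach →
    Spec_sun_loungers beach (sun_loungers beach)

def Claim_raises_sun_loungers : Prop :=
  (∀ (beach : String), Dom_sun_loungers beach → Raises_sun_loungers beach →
      ¬ Pre_sun_loungers beach) ∧
  (Dom_sun_loungers (pvRaiseWitness_sun_loungers) ∧
    Raises_sun_loungers (pvRaiseWitness_sun_loungers) ∧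
    sun_loungers_alt (pvRaiseWitness_sun_loungers) = pvRaiseWitnessOut_sun_loungers)

-- ===== LEMMAS AND PROOFS =====

-- A's greedy pass, abstracted to a scan that carries only "is the previous
-- position currently free" (mutation of the array is only ever read one step back).
def mrec (b : Bool) : List Char → Int
  | [] => 0
  | [x] => if b ∧ x = '0' then 1 else 0
  | x :: y :: t => if b ∧ x = '0' ∧ y = '0' then 1 + mrec false (y :: t)
                   else mrec (x = '0') (y :: t)

-- B's scan as a recursion (total-so-far dropped: it is additive).
def brec (run : Int) : List Char → Int
  | [] => PySem.Int.floordiv run 2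
  | x :: t => if x = '0' then brec (run + 1) t
              else (if run ≠ 0 then PySem.Int.floordiv (run - 1) 2 else 0) + brec 0 t

theorem brec_foldl (t : List Char) : ∀ (acc run : Int),
    (t.foldl sunB_step (acc, run)).1 + PySem.Int.floordiv (t.foldl sunB_step (acc, run)).2 2
      = acc + brec run t := by
  induction t with
  | nil => intro acc run; simp [brec]
  | cons x t ih =>
    intro acc run
    by_cases hx : x = '0'
    · have hstep : sunB_step (acc, run) x = (acc, run + 1) := by simp [sunB_step, hx]
      rw [List.foldl_cons, hstep, ih]
      simp [brec, hx]
    · by_cases hr : run ≠ 0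
      · have hstep : sunB_step (acc, run) x = (acc + PySem.Int.floordiv (run - 1) 2, 0) := by
          simp [sunB_step, hx, hr]
        rw [List.foldl_cons, hstep, ih]
        simp [brec, hx, hr]; ring
      · have hstep : sunB_step (acc, run) x = (acc, 0) := by simp [sunB_step, hx, hr]
        rw [List.foldl_cons, hstep, ih]
        simp [brec, hx, hr]

theorem alt_eq_brec (beach : String) : sun_loungers_alt beach = brec 1 beach.toList := by
  have := brec_foldl beach.toList 0 1
  simpa [sun_loungers_alt] using this

theorem mrec_head_ne (b b' : Bool) (x : Char) (t : List Char) (hx : ¬ x = '0') :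
    mrec b (x :: t) = mrec b' (x :: t) := by
  cases t <;> simp [mrec, hx]

theorem key_lemma : ∀ (t : List Char) (x : Char) (run : Nat),
    mrec (decide (run % 2 = 1)) (x :: t)
      + (if x = '0' then ((run / 2 : Nat) : Int) else (((run - 1) / 2 : Nat) : Int))
      = brec (run : Int) (x :: t) := by
  intro t
  induction t with
  | nil =>
    intro x run
    by_cases hx : x = '0'
    · have hc : (run : Int) + 1 = ((run + 1 : Nat) : Int) := by push_cast; ring
      simp only [mrec, brec, hx, if_pos, hc]
      by_cases hb : run % 2 = 1 <;> simp [hb] <;> omega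
    · have h0 : PySem.Int.floordiv 0 2 = 0 := by decide
      by_cases hr : run = 0
      · subst hr; simp [mrec, brec, hx]
      · have hc : (run : Int) - 1 = ((run - 1 : Nat) : Int) := by
          have : 1 ≤ run := Nat.one_le_iff_ne_zero.mpr hr
          push_cast [this]; ring
        simp [mrec, brec, hx, hr, hc]
  | cons y t' ih =>
    intro x run
    by_cases hx : x = '0'
    · have hc : (run : Int) + 1 = ((run + 1 : Nat) : Int) := by push_cast; ring
      have hbrec : brec (run : Int) (x :: y :: t') = brec ((run + 1 : Nat) : Int) (y :: t') := by
        show (if x = '0' then brec ((run : Int) + 1) (y :: t') else _) = _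
        rw [if_pos hx, hc]
      rw [hbrec, ← ih y (run + 1), if_pos hx, Nat.add_sub_cancel]
      by_cases hy : y = '0'
      · have hmrec : mrec (decide (run % 2 = 1)) (x :: y :: t')
            = if run % 2 = 1 then 1 + mrec false (y :: t') else mrec true (y :: t') := by
          by_cases hb : run % 2 = 1 <;> simp [mrec, hx, hy, hb]
        rw [hmrec, if_pos hy]
        by_cases hb : run % 2 = 1
        · rw [if_pos hb, decide_eq_false (by omega : ¬ ((run + 1) % 2 = 1))]
          generalize mrec false (y :: t') = M
          omega
        · rw [if_neg hb, decide_eq_true (by omega : (run + 1) % 2 = 1)]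
          generalize mrec true (y :: t') = M
          omega
      · have hm1 : mrec (decide (run % 2 = 1)) (x :: y :: t')
            = mrec (decide ((run + 1) % 2 = 1)) (y :: t') := by
          have h1 : mrec (decide (run % 2 = 1)) (x :: y :: t') = mrec true (y :: t') := by
            cases hb : decide (run % 2 = 1) <;> simp [mrec, hx, hy]
          rw [h1]
          exact mrec_head_ne _ _ _ _ hy
        rw [hm1, if_neg hy]
    · have hr0 : PySem.Int.floordiv 0 2 = 0 := by decide
      have hbrec : brec (run : Int) (x :: y :: t')
          = (if (run : Int) ≠ 0 then PySem.Int.floordiv ((run : Int) - 1) 2 else 0)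
            + brec ((0 : Nat) : Int) (y :: t') := by
        show (if x = '0' then _ else _) = _
        rw [if_neg hx]
        norm_num
      have hm : mrec (decide (run % 2 = 1)) (x :: y :: t')
          = mrec (decide ((0 : Nat) % 2 = 1)) (y :: t') := by
        have h1 : mrec (decide (run % 2 = 1)) (x :: y :: t') = mrec false (y :: t') := by
          cases hb : decide (run % 2 = 1) <;> simp [mrec, hx]
        rw [h1]
        norm_num
      rw [hbrec, ← ih y 0, hm, if_neg hx]
      have hE0 : (if y = '0' then (((0 : Nat) / 2 : Nat) : Int)
          else ((((0 : Nat) - 1) / 2 : Nat) : Int)) = 0 := by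
        by_cases hy : y = '0' <;> simp [hy]
      rw [hE0, add_zero]
      generalize mrec (decide ((0 : Nat) % 2 = 1)) (y :: t') = M
      by_cases hr : run = 0
      · subst hr
        rw [if_neg (by simp : ¬ ((0 : Nat) : Int) ≠ 0)]
        simp
      · have hc : (run : Int) - 1 = ((run - 1 : Nat) : Int) := by
          have h1 : 1 ≤ run := Nat.one_le_iff_ne_zero.mpr hr
          push_cast [h1]; ring
        have hr' : ((run : Nat) : Int) ≠ 0 := by exact_mod_cast hr
        rw [if_pos hr', hc]
        rw [show PySem.Int.floordiv ((run - 1 : Nat) : Int) 2 = (((run - 1) / 2 : Nat) : Int) from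
          by exact_mod_cast PySem.Int.floordiv_natCast (run - 1) 2]
        ring

theorem mrec_eq_brec (x : Char) (t : List Char) :
    mrec true (x :: t) = brec 1 (x :: t) := by
  have h := key_lemma t x 1
  simpa using h

-- Invariant for A's main loop (plus the final boundary check), relating the
-- mutated array scan to mrec on the untouched suffix.
theorem sunA_get_nat (A : List Char) (n : Nat) (h : n < A.length) :
    sunA_get A (n : Int) = A[n] := by
  rw [sunA_get, PySem.List.pyGetD_eq_getElem A '?' (by omega) (by exact_mod_cast h)]
  simp

theorem a_loop : ∀ (k : Nat) (A : List Char) (c : Int) (i : Nat),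
    1 ≤ i → i + k + 1 = A.length →
    sunA_fin ((PySem.List.pyRange (i : Int) ((A.length : Int) - 1) 1).foldl sunA_step (A, c))
      = c + mrec (decide (sunA_get A ((i : Int) - 1) = '0')) (A.drop i) := by
  intro k
  induction k with
  | zero =>
    intro A c i hi hlen
    have hnil : PySem.List.pyRange (i : Int) ((A.length : Int) - 1) 1 = [] :=
      PySem.List.pyRange_one_eq_nil (by omega)
    rw [hnil, List.foldl_nil]
    have hdrop : A.drop i = [A[i]'(by omega)] := by
      have hd1 : A.drop i = A[i]'(by omega) :: A.drop (i + 1) :=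
        List.drop_eq_getElem_cons (by omega)
      have hd2 : A.drop (i + 1) = [] := List.drop_eq_nil_of_le (by omega)
      rw [hd1, hd2]
    have hm1 : sunA_get A ((i : Int) - 1) = A[i - 1]'(by omega) := by
      rw [show ((i : Nat) : Int) - 1 = ((i - 1 : Nat) : Int) from by omega]
      exact sunA_get_nat A (i - 1) (by omega)
    have hn2 : sunA_get A (-2) = A[i - 1]'(by omega) := by
      rw [sunA_get, PySem.List.pyGetD_neg_ofNat A 2 '?' (by omega) (by omega)]
      congr 1
      omega
    have hn1 : sunA_get A (-1) = A[i]'(by omega) := by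
      rw [sunA_get, PySem.List.pyGetD_neg_ofNat A 1 '?' (by omega) (by omega)]
      congr 1
      omega
    rw [sunA_fin, hn2, hn1, hm1, hdrop]
    by_cases h1 : A[i - 1]'(by omega) = '0' <;> by_cases h2 : A[i]'(by omega) = '0' <;>
      simp [mrec, h1, h2]
  | succ k ih =>
    intro A c i hi hlen
    have hcons : PySem.List.pyRange (i : Int) ((A.length : Int) - 1) 1
        = (i : Int) :: PySem.List.pyRange ((i : Int) + 1) ((A.length : Int) - 1) 1 :=
      PySem.List.pyRange_one_cons (by omega)
    have hm1 : sunA_get A ((i : Int) - 1) = A[i - 1]'(by omega) := by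
      rw [show ((i : Nat) : Int) - 1 = ((i - 1 : Nat) : Int) from by omega]
      exact sunA_get_nat A (i - 1) (by omega)
    have hg0 : sunA_get A (i : Int) = A[i]'(by omega) := sunA_get_nat A i (by omega)
    have hg1 : sunA_get A ((i : Int) + 1) = A[i + 1]'(by omega) := by
      rw [show ((i : Nat) : Int) + 1 = ((i + 1 : Nat) : Int) from by omega]
      exact sunA_get_nat A (i + 1) (by omega)
    have hdropi : A.drop i = A[i]'(by omega) :: A[i + 1]'(by omega) :: A.drop (i + 2) := by
      rw [List.drop_eq_getElem_cons (l := A) (by omega),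
        List.drop_eq_getElem_cons (l := A) (by omega)]
    rw [hcons, List.foldl_cons]
    by_cases hcond : A[i - 1]'(by omega) = '0' ∧ A[i]'(by omega) = '0' ∧ A[i + 1]'(by omega) = '0'
    · have hstep : sunA_step (A, c) (i : Int) = (A.set i '1', c + 1) := by
        rw [sunA_step]
        simp only [hm1, hg0, hg1]
        rw [if_pos hcond, PySem.List.pySetD_of_nonneg A '1' (by omega)]
        simp
      have hlen' : (A.set i '1').length = A.length := by simp
      have ih' := ih (A.set i '1') (c + 1) (i + 1) (by omega) (by simp; omega)
      rw [hstep]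
      rw [show ((i : Nat) : Int) + 1 = (((i + 1 : Nat) : Nat) : Int) from by push_cast; ring] at *
      rw [show ((A.length : Int)) - 1 = ((A.set i '1').length : Int) - 1 from by rw [hlen']] at *
      rw [ih']
      have hb' : sunA_get (A.set i '1') (((i + 1 : Nat) : Int) - 1) = '1' := by
        rw [show (((i + 1 : Nat) : Nat) : Int) - 1 = ((i : Nat) : Int) from by push_cast; ring]
        rw [sunA_get_nat (A.set i '1') i (by simp; omega)]
        simp
      have hdrop' : (A.set i '1').drop (i + 1) = A.drop (i + 1) := by
        rw [List.drop_set]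
        simp
      rw [hb', hdrop', hdropi, hm1]
      have hdropi1 : A.drop (i + 1) = A[i + 1]'(by omega) :: A.drop (i + 2) := by
        rw [List.drop_eq_getElem_cons (l := A) (by omega)]
      rw [hdropi1]
      simp [mrec, hcond.1, hcond.2.1, hcond.2.2]
      ring
    · have hstep : sunA_step (A, c) (i : Int) = (A, c) := by
        rw [sunA_step]
        simp only [hm1, hg0, hg1]
        rw [if_neg hcond]
      have ih' := ih A c (i + 1) (by omega) (by omega)
      rw [hstep]
      rw [show ((i : Nat) : Int) + 1 = (((i + 1 : Nat) : Nat) : Int) from by push_cast; ring]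
      rw [ih']
      have hb' : sunA_get A (((i + 1 : Nat) : Int) - 1) = A[i]'(by omega) := by
        rw [show (((i + 1 : Nat) : Nat) : Int) - 1 = ((i : Nat) : Int) from by push_cast; ring]
        exact hg0
      rw [hb', hdropi, hm1]
      have hdropi1 : A.drop (i + 1) = A[i + 1]'(by omega) :: A.drop (i + 2) := by
        rw [List.drop_eq_getElem_cons (l := A) (by omega)]
      rw [hdropi1]
      congr 1
      simp only [mrec]
      rw [if_neg (by simpa using hcond)]

theorem a_eq_mrec (beach : String) (h2 : 2 ≤ beach.toList.length) :
    sun_loungers beach = mrec true beach.toList := by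
  obtain ⟨a0, a1, t, hA⟩ : ∃ a0 a1 t, beach.toList = a0 :: a1 :: t := by
    cases h : beach.toList with
    | nil => rw [h] at h2; simp at h2
    | cons a l =>
      cases l with
      | nil => rw [h] at h2; simp at h2
      | cons b l2 => exact ⟨a, b, l2, rfl⟩
  have hnot : ¬ (PySem.Str.len beach = 1 ∧ beach = "0") := by
    intro ⟨hl, _⟩
    rw [PySem.Str.len_eq] at hl
    omega
  simp only [sun_loungers]
  rw [if_neg hnot, hA]
  have hg0 : sunA_get (a0 :: a1 :: t) 0 = a0 := PySem.List.pyGetD_zero_cons _ _ _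
  have hg1 : sunA_get (a0 :: a1 :: t) 1 = a1 := by
    rw [sunA_get, PySem.List.pyGetD_eq_getElem _ '?' (by norm_num) (by simp)]
    simp
  have hcast1 : ((1 : Nat) : Int) = 1 := rfl
  by_cases h01 : a0 = '0' ∧ a1 = '0'
  · rw [if_pos (by rw [hg0, hg1]; exact h01)]
    have hset : PySem.List.pySetD (a0 :: a1 :: t) 0 '1' = '1' :: a1 :: t := by
      rw [PySem.List.pySetD_of_nonneg _ '1' (by norm_num)]
      simp
    rw [hset]
    have hloop := a_loop t.length ('1' :: a1 :: t) (0 + 1) 1 (by omega)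
      (by simp only [List.length_cons]; omega)
    rw [hcast1] at hloop
    simp only [List.length_cons] at hloop ⊢
    rw [hloop]
    have hb : sunA_get ('1' :: a1 :: t) ((1 : Int) - 1) = '1' := by
      rw [show (1 : Int) - 1 = 0 from by norm_num]
      exact PySem.List.pyGetD_zero_cons _ _ _
    rw [hb]
    rw [show mrec true (a0 :: a1 :: t) = 1 + mrec false (a1 :: t) from by
      simp [mrec, h01.1, h01.2]]
    simp
  · rw [if_neg (by rw [hg0, hg1]; exact h01)]
    have hloop := a_loop t.length (a0 :: a1 :: t) 0 1 (by omega)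
      (by simp only [List.length_cons]; omega)
    rw [hcast1] at hloop
    simp only [List.length_cons] at hloop ⊢
    rw [hloop]
    have hb : sunA_get (a0 :: a1 :: t) ((1 : Int) - 1) = a0 := by
      rw [show (1 : Int) - 1 = 0 from by norm_num]
      exact PySem.List.pyGetD_zero_cons _ _ _
    rw [hb]
    have hrhs : mrec true (a0 :: a1 :: t) = mrec (decide (a0 = '0')) (a1 :: t) := by
      simp only [mrec]
      rw [if_neg (by simpa using h01)]
    rw [hrhs]
    simp

-- ===== VERDICT (by name: the statement is the Claim_ definition above) =====
theorem sun_loungers_spec : Claim_equal_sun_loungers := by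
  intro beach _ hpre
  unfold Spec_sun_loungers
  rcases hpre with h2 | h0
  · obtain ⟨x, t, hxt⟩ : ∃ x t, beach.toList = x :: t := by
      cases hl : beach.toList with
      | nil => rw [hl] at h2; simp at h2
      | cons a l => exact ⟨a, l, rfl⟩
    rw [a_eq_mrec beach h2, alt_eq_brec, hxt, mrec_eq_brec]
  · subst h0; decide

theorem sun_loungers_raises : Claim_raises_sun_loungers := by
  unfold Claim_raises_sun_loungers
  constructor
  · intro beach _ hr hpre
    unfold Raises_sun_loungers at hr
    unfold Pre_sun_loungers at hpre
    rcases hpre with h2 | h0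
    · rcases hr with h | h
      · omega
      · omega
    · subst h0; rcases hr with h | h
      · simp at h
      · exact h.2 rfl
  · exact ⟨by decide, by decide, by decide⟩

-- self-check peeled off the raises claim: B's port really returns the stated
-- literal at the crash witness.
theorem sun_loungers_raises_ok :
    sun_loungers_alt pvRaiseWitness_sun_loungers = pvRaiseWitnessOut_sun_loungers :=
  sun_loungers_raises.2.2.2
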